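-- pv_equiv track=rewrite | github.com/BI3AGV/esptx_micropython | pocsag.py | evenCheck
-- ===== SOURCE A (Python) =====
-- def evenCheck(data):  # 偶校验算法
--     count = 0
--     for i in range(32):
--         if (data << i) & 0x80000000 > 0:
--             count += 1
--     if count % 2 == 0:
--         return 0
--     else:
--         return 1
-- ===== SOURCE B (Python) =====
-- def evenCheck(data):  # parity of the low 32 bits via a logarithmic XOR fold
--     x = data & 0xFFFFFFFF
--     x ^= x >> 16
--     x ^= x >> 8
--     x ^= x >> 4
--     x ^= x >> 2
--     x ^= x >> 1
--     return x & 1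
-- ===== Notes on version B (the rewrite author's own statement) =====
-- stated objective: alternative
-- what changed: Replaces the 32-iteration bit-counting loop with a mask and five bit-parallel XOR folds (x ^= x>>16 ... x ^= x>>1), returning the low bit.
import Mathlib
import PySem

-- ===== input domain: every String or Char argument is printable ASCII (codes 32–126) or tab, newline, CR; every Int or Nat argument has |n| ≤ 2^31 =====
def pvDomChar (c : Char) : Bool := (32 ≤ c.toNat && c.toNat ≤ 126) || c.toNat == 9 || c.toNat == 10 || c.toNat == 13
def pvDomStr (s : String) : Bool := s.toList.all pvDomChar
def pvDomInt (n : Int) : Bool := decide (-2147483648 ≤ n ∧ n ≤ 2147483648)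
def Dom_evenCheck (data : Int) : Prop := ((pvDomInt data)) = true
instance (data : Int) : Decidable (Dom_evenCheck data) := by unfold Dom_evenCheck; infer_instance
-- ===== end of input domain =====

-- B replaces A's 32-iteration set-bit-counting loop by a mask and five bit-parallel XOR folds of the low 32 bits.

-- ===== PORT A =====
def evenCheck (data : Int) : Int :=
  let count : Int :=
    (List.range 32).foldl
      (fun (count : Int) (i : Nat) => if 0 < PySem.Int.band (data <<< i) 0x80000000 then count + 1 else count) 0
  if PySem.Int.mod count 2 = 0 then 0 else 1

-- ===== PORT B =====
def evenCheck_alt (data : Int) : Int :=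
  let x0 := PySem.Int.band data 0xFFFFFFFF
  let x1 := PySem.Int.bxor x0 (x0 >>> (16:Nat))
  let x2 := PySem.Int.bxor x1 (x1 >>> (8:Nat))
  let x3 := PySem.Int.bxor x2 (x2 >>> (4:Nat))
  let x4 := PySem.Int.bxor x3 (x3 >>> (2:Nat))
  let x5 := PySem.Int.bxor x4 (x4 >>> (1:Nat))
  PySem.Int.band x5 1

-- ===== PRECONDITION & SPEC =====
def Spec_evenCheck (data : Int) (out : Int) : Prop := out = evenCheck_alt data
instance (data : Int) (out : Int) : Decidable (Spec_evenCheck data out) := by unfold Spec_evenCheck; infer_instance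

-- ===== CLAIM (what is proved, stated in full; the proofs are below) =====
def Claim_equal_evenCheck : Prop := ∀ (data : Int), Dom_evenCheck data → Spec_evenCheck data (evenCheck data)

-- ===== LEMMAS AND PROOFS =====

-- the low 32 bits of `data`, as a natural number: both ports only depend on this
def pvLow32 (data : Int) : Nat := (data % 4294967296).toNat

-- B's XOR-fold chain, restated on the natural number holding the low 32 bits
def pvChain (n : Nat) : Nat :=
  let x1 := n ^^^ (n >>> 16)
  let x2 := x1 ^^^ (x1 >>> 8)
  let x3 := x2 ^^^ (x2 >>> 4)
  let x4 := x3 ^^^ (x3 >>> 2)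
  x4 ^^^ (x4 >>> 1)

-- number of set bits among bits 0..31
def pvPop (n : Nat) : Nat := ∑ k ∈ Finset.range 32, (n.testBit k).toNat

-- Python's `a & 0xFFFFFFFF` is `a mod 2^32`
lemma band_mask (a : Int) : PySem.Int.band a 4294967295 = a % 4294967296 := by
  unfold PySem.Int.band
  have hm : (4294967295:Int).toNat = 2^32 - 1 := by decide
  split_ifs with h h2 h3
  · rw [hm, Nat.and_two_pow_sub_one_eq_mod]
    have := Nat.mod_lt a.toNat (y := 2^32) (by norm_num)
    norm_num at this ⊢
    omega
  · norm_num at h2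
  · rw [hm, Nat.and_comm, Nat.and_two_pow_sub_one_eq_mod]
    have := Nat.mod_lt (-a-1).toNat (y := 2^32) (by norm_num)
    norm_num at this ⊢
    omega
  · norm_num at h3

-- reducing mod 2^32 does not change the parity of the quotient by 2^k, k ≤ 31
lemma emod_pow_div_parity (a : Int) (k : Nat) (hk : k ≤ 31) :
    (a % 4294967296) / 2^k % 2 = a / 2^k % 2 := by
  have hadd : k + (31 - k) = 31 := by omega
  have hN : (4294967296:Int) = 2^k * (2 * 2^(31-k)) := by
    calc (4294967296:Int) = 2^(k + (31-k)) * 2 := by rw [hadd]; norm_num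
    _ = 2^k * (2 * 2^(31-k)) := by rw [pow_add]; ring
  have hmod : a % 4294967296 = a - 4294967296 * (a / 4294967296) := Int.emod_def a _
  set q := a / 4294967296 with hq
  set z : Int := 2^(31-k) * q with hz
  have h2k : (2:Int)^k ≠ 0 := by positivity
  have he : a % 4294967296 = a + (-(2*z)) * 2^k := by rw [hmod, hN, hz]; ring
  rw [he, Int.add_mul_ediv_right _ _ h2k,
      show a / 2^k + -(2*z) = a / 2^k + 2 * (-z) from by ring, Int.add_mul_emod_self_left]

-- Python's `a & 0x80000000` extracts bit 31 of `a`, as 0 or 2^31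
lemma band_msb (a : Int) : PySem.Int.band a 2147483648 = if a / 2147483648 % 2 = 1 then 2147483648 else 0 := by
  unfold PySem.Int.band
  have hm : (2147483648:Int).toNat = 2^31 := by decide
  have e1 : ∀ m : Nat, m &&& (2147483648:Int).toNat = m / 2147483648 % 2 * 2147483648 := by
    intro m
    rw [hm, Nat.and_two_pow, Nat.toNat_testBit]
    norm_num
  have e2 : ∀ m : Nat, (2147483648:Int).toNat &&& m = m / 2147483648 % 2 * 2147483648 := by
    intro m; rw [Nat.and_comm]; exact e1 m
  simp only [e1, e2]
  split_ifs <;> omega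

-- A's loop test at iteration i reads bit 31-i of the low 32 bits of data
lemma shift_cond (data : Int) (i : Nat) (h : i < 32) :
    (0 < PySem.Int.band (data <<< i) 2147483648) ↔ (pvLow32 data).testBit (31 - i) = true := by
  have hk : 31 - i + i = 31 := by omega
  have hdiv : data <<< i / 2147483648 = data / 2^(31-i) := by
    rw [Int.shiftLeft_eq]
    have h31 : (2147483648:Int) = 2^(31-i) * 2^i := by
      rw [← pow_add, hk]; norm_num
    rw [h31, Int.mul_ediv_mul_of_pos_left _ _ (by positivity)]
  have hr : (0:Int) ≤ data % 4294967296 := Int.emod_nonneg data (by norm_num)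
  have hmN : ((pvLow32 data : Nat) : Int) = data % 4294967296 := Int.toNat_of_nonneg hr
  have hcast : ((pvLow32 data / 2^(31-i) % 2 : Nat) : Int) = (data % 4294967296) / 2^(31-i) % 2 := by
    rw [← hmN]; push_cast; rfl
  have hpar := emod_pow_div_parity data (31 - i) (by omega)
  have main : (data <<< i / 2147483648 % 2 = 1) ↔ ((pvLow32 data).testBit (31-i) = true) := by
    rw [Nat.testBit_eq_decide_div_mod_eq, decide_eq_true_eq, hdiv, ← hpar, ← hcast]
    exact ⟨fun h' => by exact_mod_cast h', fun h' => by rw [h']; rfl⟩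
  rw [band_msb]
  split_ifs with hc
  · simp only [main.mp hc]
    norm_num
  · norm_num
    cases hb : (pvLow32 data).testBit (31 - i)
    · rfl
    · exact absurd (main.mpr hb) hc

-- in ZMod 2, A's counting loop is the sum of its tests
lemma foldl_parity (data : Int) : ∀ (l : List Nat) (z : Int),
    (((l.foldl (fun (count : Int) (i : Nat) => if 0 < PySem.Int.band (data <<< i) 2147483648 then count + 1 else count) z : Int)) : ZMod 2)
      = (z : ZMod 2) + (l.map (fun (i : Nat) => if 0 < PySem.Int.band (data <<< i) 2147483648 then (1:ZMod 2) else 0)).sum := by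
  intro l
  induction l with
  | nil => simp
  | cons a l ih =>
      intro z
      simp only [List.foldl_cons, List.map_cons, List.sum_cons, ih]
      split_ifs <;> push_cast <;> ring

lemma xor_toNat_zmod (a b : Bool) : (((a ^^ b)).toNat : ZMod 2) = (a.toNat : ZMod 2) + (b.toNat : ZMod 2) := by
  cases a <;> cases b <;> decide

lemma bool_if_zmod (b : Bool) : (if b = true then (1:ZMod 2) else 0) = (b.toNat : ZMod 2) := by
  cases b <;> simp

-- the low bit of the XOR-fold chain is the parity of the 32 low bits
lemma chain_parity (n : Nat) : ((pvChain n).testBit 0).toNat = pvPop n % 2 := by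
  have hz : (((pvChain n).testBit 0).toNat : ZMod 2) = ((pvPop n : Nat) : ZMod 2) := by
    simp only [pvChain, Nat.testBit_xor, Nat.testBit_shiftRight, Nat.add_zero]
    simp only [xor_toNat_zmod]
    rw [pvPop]
    push_cast
    simp only [Finset.sum_range_succ, Finset.sum_range_zero]
    norm_num
    ring
  rw [ZMod.natCast_eq_natCast_iff] at hz
  have h1 : ((pvChain n).testBit 0).toNat ≤ 1 := by cases (pvChain n).testBit 0 <;> simp
  unfold Nat.ModEq at hz
  omega

-- A computes the parity of the low 32 bits
lemma evenCheck_eq (data : Int) : evenCheck data = ((pvPop (pvLow32 data) % 2 : Nat) : Int) := by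
  simp only [evenCheck]
  have hψ := foldl_parity data (List.range 32) 0
  have hmap : (List.range 32).map (fun (i : Nat) => if 0 < PySem.Int.band (data <<< i) 2147483648 then (1:ZMod 2) else 0)
      = (List.range 32).map (fun (i : Nat) => if (pvLow32 data).testBit (31 - i) then (1:ZMod 2) else 0) := by
    apply List.map_congr_left
    intro i hi
    rw [if_congr (shift_cond data i (List.mem_range.mp hi)) rfl rfl]
  have hlist : ((List.range 32).map (fun (i : Nat) => if (pvLow32 data).testBit (31 - i) then (1:ZMod 2) else 0)).sum
      = ∑ j ∈ Finset.range 32, (if (pvLow32 data).testBit (31 - j) then (1:ZMod 2) else 0) := rfl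
  have hrefl := Finset.sum_range_reflect (fun k => if (pvLow32 data).testBit k then (1:ZMod 2) else 0) 32
  simp only [show (32:Nat) - 1 = 31 from rfl] at hrefl
  have hsum2 : ∑ k ∈ Finset.range 32, (if (pvLow32 data).testBit k then (1:ZMod 2) else 0)
      = ((pvPop (pvLow32 data) : Nat) : ZMod 2) := by
    rw [pvPop]
    push_cast
    exact Finset.sum_congr rfl (fun k _ => bool_if_zmod _)
  rw [hmap, hlist, hrefl, hsum2] at hψ
  set count : Int := (List.range 32).foldl
      (fun (count : Int) (i : Nat) => if 0 < PySem.Int.band (data <<< i) 2147483648 then count + 1 else count) 0 with hcount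
  have hψ' : ((count : Int) : ZMod 2) = ((pvPop (pvLow32 data) : Nat) : ZMod 2) := by
    rw [hψ, Int.cast_zero, zero_add]
  have hmod : PySem.Int.mod count 2 = count % 2 := by
    unfold PySem.Int.mod
    rw [Int.fmod_eq_emod]
    simp
  have hiff : (count % 2 = 0) ↔ (pvPop (pvLow32 data) % 2 = 0) := by
    rw [← Int.dvd_iff_emod_eq_zero, ← Nat.dvd_iff_mod_eq_zero]
    rw [show ((2:Int)) = ((2:Nat):Int) from rfl, ← ZMod.intCast_zmod_eq_zero_iff_dvd, ← ZMod.natCast_eq_zero_iff]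
    rw [hψ']
  rw [hmod]
  split_ifs with h
  · rw [hiff.mp h]
    rfl
  · have : pvPop (pvLow32 data) % 2 = 1 := by
      have := fun hh => h (hiff.mpr hh)
      omega
    rw [this]
    rfl

-- B computes the parity of the low 32 bits
lemma evenCheck_alt_eq (data : Int) : evenCheck_alt data = ((pvPop (pvLow32 data) % 2 : Nat) : Int) := by
  simp only [evenCheck_alt]
  rw [band_mask]
  rw [show (data % 4294967296) = ((pvLow32 data : Nat) : Int) from
    (Int.toNat_of_nonneg (Int.emod_nonneg data (by norm_num))).symm]
  simp only [← Int.natCast_shiftRight, PySem.Int.bxor_natCast]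
  rw [show (1:Int) = ((1:Nat):Int) from rfl, PySem.Int.band_natCast, Nat.and_one_is_mod]
  have h0 : ∀ x : Nat, x % 2 = (x.testBit 0).toNat := by
    intro x; rw [Nat.toNat_testBit]; norm_num
  rw [h0, ← chain_parity (pvLow32 data)]
  rfl

-- ===== VERDICT (by name: the statement is the Claim_ definition above) =====
theorem evenCheck_spec : Claim_equal_evenCheck := by
  intro data _
  unfold Spec_evenCheck
  rw [evenCheck_eq, evenCheck_alt_eq]
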